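-- pv_equiv track=rewrite | github.com/migberbay/AoC-2025 | solvers/day10.py | pseudoBFS
-- ===== SOURCE A (Python) =====
-- from collections import deque
--
-- def pseudoBFS(target, buttons, num_lights):
--     # Start with all lights OFF (0)
--     initial_state = 0
--
--     state = (initial_state, 0)  # (current light state, button press count)
--     q = deque([state])
--     visited = {initial_state}
--
--     while q:
--         current_lights, presses = q.popleft()
--
--         # Check if we reached the target configuration
--         if current_lights == target:
--             return presses
--
--         # Explore all button presses
--         for button in buttons:
--             new_lights = current_lights ^ button  # XOR to toggle bits
--
--             if new_lights not in visited:
--                 visited.add(new_lights)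
--                 q.append((new_lights, presses + 1))
--
--     return -1  # If no solution is found
-- ===== SOURCE B (Python) =====
-- def pseudoBFS(target, buttons, num_lights):
--     # Compute, per press count, the set of light states first reachable with exactly
--     # that many presses; return the press count whose set contains the target.
--     frontier = {0}
--     seen = {0}
--     presses = 0
--     while frontier:
--         if target in frontier:
--             return presses
--         frontier = {s ^ b for s in frontier for b in buttons} - seen
--         seen |= frontier
--         presses += 1
--     return -1
-- ===== Notes on version B (the rewrite author's own statement) =====
-- stated objective: faster
-- what changed: Replaces the state-at-a-time queue BFS (deque of (state, presses) pairs, visited set, per-state neighbour loop) by a press-count-indexed computation of whole levels: repeatedly build the set of states first reachable with exactly r presses as one set comprehension minus the seen set, returning r as soon as the target's level is reached, -1 when the frontier empties.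
import Mathlib
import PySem

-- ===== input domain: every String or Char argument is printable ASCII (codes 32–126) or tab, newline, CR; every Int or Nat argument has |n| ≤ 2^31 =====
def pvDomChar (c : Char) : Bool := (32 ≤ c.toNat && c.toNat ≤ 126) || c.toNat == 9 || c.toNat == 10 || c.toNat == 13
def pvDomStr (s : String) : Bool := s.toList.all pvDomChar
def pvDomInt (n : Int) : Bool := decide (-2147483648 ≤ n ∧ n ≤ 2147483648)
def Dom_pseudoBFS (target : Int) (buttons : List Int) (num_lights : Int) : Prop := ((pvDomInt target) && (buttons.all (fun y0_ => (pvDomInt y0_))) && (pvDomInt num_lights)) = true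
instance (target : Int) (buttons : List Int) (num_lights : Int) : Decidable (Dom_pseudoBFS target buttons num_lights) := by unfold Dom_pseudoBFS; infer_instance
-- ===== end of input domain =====

-- B replaces A's state-at-a-time queue BFS (deque + visited set, per-state neighbour
-- loop) by a per-press-count computation of whole level sets via set comprehensions
-- (objective: faster — no per-state queue processing).

-- ===== PORT A =====
-- the while loop of A; the Nat fuel only makes the recursion total and is proved
-- sufficient below (iterations ≤ 1 + 2·#reachable states ≤ 2^(len+1)+1 < fuel)
def pvBFSLoop (target : Int) (buttons : List Int) : Nat → List (Int × Int) → PySem.Set Int → Int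
  | 0, _, _ => -1
  | _ + 1, [], _ => -1
  | fuel + 1, (currentLights, presses) :: rest, visited =>
    if currentLights = target then presses
    else
      let vq := buttons.foldl (fun (vq : PySem.Set Int × List (Int × Int)) button =>
        let newLights := PySem.Int.bxor currentLights button
        if PySem.Set.contains vq.1 newLights then vq
        else (PySem.Set.add vq.1 newLights, vq.2 ++ [(newLights, presses + 1)])) (visited, rest)
      pvBFSLoop target buttons fuel vq.2 vq.1

def pseudoBFS (target : Int) (buttons : List Int) (num_lights : Int) : Int :=
  pvBFSLoop target buttons (2 ^ (buttons.length + 1) + 2) [(0, 0)] (PySem.Set.ofList [0])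

-- ===== PORT B =====
-- the while loop of Source B; the Nat fuel only makes the recursion total and is proved
-- sufficient below (iterations ≤ #distinct reachable states + 2 ≤ 2^len + 2)
def pvAltLoop (target : Int) (buttons : List Int) :
    Nat → PySem.Set Int → PySem.Set Int → Int → Int
  | 0, _, _, _ => -1
  | fuel + 1, frontier, seen, presses =>
    if frontier.isEmpty then -1
    else if PySem.Set.contains frontier target then presses
    else
      let nf := PySem.Set.diff
        (PySem.Set.ofList (frontier.flatMap (fun s => buttons.map (fun b => PySem.Int.bxor s b))))
        seen
      pvAltLoop target buttons fuel nf (PySem.Set.union seen nf) (presses + 1)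

def pseudoBFS_alt (target : Int) (buttons : List Int) (num_lights : Int) : Int :=
  pvAltLoop target buttons (2 ^ buttons.length + 2) (PySem.Set.ofList [0]) (PySem.Set.ofList [0]) 0

-- ===== PRECONDITION & SPEC =====
def Spec_pseudoBFS (target : Int) (buttons : List Int) (num_lights : Int) (out : Int) : Prop := out = pseudoBFS_alt target buttons num_lights
instance (target : Int) (buttons : List Int) (num_lights : Int) (out : Int) : Decidable (Spec_pseudoBFS target buttons num_lights out) := by unfold Spec_pseudoBFS; infer_instance

-- ===== CLAIM (what is proved, stated in full; the proofs are below) =====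
def Claim_equal_pseudoBFS : Prop := ∀ (target : Int) (buttons : List Int) (num_lights : Int), Dom_pseudoBFS target buttons num_lights → Spec_pseudoBFS target buttons num_lights (pseudoBFS target buttons num_lights)

-- ===== LEMMAS AND PROOFS =====

-- ---- XOR algebra ----
theorem pvBxor_eq_xor (a b : Int) : PySem.Int.bxor a b = Int.xor a b := by
  cases a with
  | ofNat m => cases b with
    | ofNat n => simp [PySem.Int.bxor, Int.xor]
    | negSucc n => simp [PySem.Int.bxor, Int.xor, Int.negSucc_eq]; omega
  | negSucc m => cases b with
    | ofNat n => simp [PySem.Int.bxor, Int.xor, Int.negSucc_eq]; omega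
    | negSucc n => simp [PySem.Int.bxor, Int.xor, Int.negSucc_eq]; omega

theorem pvBxor_assoc (a b c : Int) :
    PySem.Int.bxor (PySem.Int.bxor a b) c = PySem.Int.bxor a (PySem.Int.bxor b c) := by
  simp only [pvBxor_eq_xor]
  cases a <;> cases b <;> cases c <;> simp [Int.xor, Nat.xor_assoc]

theorem pvBxor_cancel (a x : Int) : PySem.Int.bxor a (PySem.Int.bxor a x) = x := by
  rw [← pvBxor_assoc, PySem.Int.bxor_self]
  rw [PySem.Int.bxor_comm]
  exact PySem.Int.bxor_zero x

-- ---- xor of a list ----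
def xorF (c : List Int) : Int := c.foldr PySem.Int.bxor 0

theorem xorF_cons (a : Int) (c : List Int) : xorF (a :: c) = PySem.Int.bxor a (xorF c) := rfl

theorem xorF_perm {c c' : List Int} (h : c.Perm c') : xorF c = xorF c' := by
  induction h with
  | nil => rfl
  | cons a _ ih => simp [xorF_cons, ih]
  | swap a b l =>
    simp only [xorF_cons, ← pvBxor_assoc]
    rw [PySem.Int.bxor_comm b a]
  | trans _ _ ih1 ih2 => exact ih1.trans ih2

-- ---- proof-side helpers: XORs of all r-element combinations, and the scan that
-- returns the least combination size reaching the target ----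
def xorsOfSize (items : List Int) (r : Int) : List Int :=
  if r = 0 then [0]
  else if (items.length : Int) < r then []
  else match items with
    | [] => []
    | first :: rest =>
      (xorsOfSize rest (r - 1)).map (fun x => PySem.Int.bxor first x) ++ xorsOfSize rest r
  termination_by items.length

def pvBLoop (target : Int) (buttons : List Int) : List Int → Int
  | [] => -1
  | r :: rs => if target ∈ xorsOfSize buttons r then r else pvBLoop target buttons rs

-- ---- membership in xorsOfSize = xor of a length-r sublist ----
theorem mem_xorsOfSize (items : List Int) (r : Nat) (x : Int) :
    x ∈ xorsOfSize items (r : Int) ↔ ∃ c, c.Sublist items ∧ c.length = r ∧ xorF c = x := by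
  induction items generalizing r x with
  | nil =>
    cases r with
    | zero =>
      rw [xorsOfSize]
      norm_num
      exact ⟨fun h => h ▸ rfl, fun h => h.symm⟩
    | succ r' =>
      rw [xorsOfSize]
      have h0 : ((r' + 1 : Nat) : Int) ≠ 0 := by push_cast; omega
      have h1 : (([] : List Int).length : Int) < ((r' + 1 : Nat) : Int) := by push_cast; simp
      simp only [if_neg h0, if_pos h1, List.not_mem_nil, false_iff]
      rintro ⟨c, hs, hl, -⟩
      have := hs.length_le; simp only [List.length_nil, Nat.le_zero] at this; omega
  | cons a items ih =>
    cases r with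
    | zero =>
      rw [xorsOfSize]
      norm_num
      constructor
      · rintro rfl; exact ⟨[], List.nil_sublist _, rfl, rfl⟩
      · rintro ⟨c, -, rfl, hx⟩; exact hx.symm
    | succ r' =>
      rw [xorsOfSize]
      have h0 : ((r' + 1 : Nat) : Int) ≠ 0 := by push_cast; omega
      rw [if_neg h0]
      by_cases hlen : (((a :: items).length : Int)) < ((r' + 1 : Nat) : Int)
      · rw [if_pos hlen]
        simp only [List.not_mem_nil, false_iff]
        rintro ⟨c, hs, hl, -⟩
        have := hs.length_le
        simp only [List.length_cons] at this hlen
        push_cast at hlen; omega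
      · rw [if_neg hlen]
        have hsub : ((r' + 1 : Nat) : Int) - 1 = ((r' : Nat) : Int) := by push_cast; ring
        rw [hsub]
        simp only [List.mem_append, List.mem_map]
        constructor
        · rintro (⟨y, hy, rfl⟩ | hx)
          · obtain ⟨c, hs, hl, hxf⟩ := (ih r' y).mp hy
            exact ⟨a :: c, hs.cons₂ a, by simp [hl], by rw [xorF_cons, hxf]⟩
          · obtain ⟨c, hs, hl, hxf⟩ := (ih (r' + 1) x).mp hx
            exact ⟨c, hs.cons a, hl, hxf⟩
        · rintro ⟨c, hs, hl, hxf⟩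
          rcases List.sublist_cons_iff.mp hs with hs' | ⟨cr, rfl, hcr⟩
          · exact Or.inr ((ih (r' + 1) x).mpr ⟨c, hs', hl, hxf⟩)
          · refine Or.inl ⟨xorF cr, (ih r' (xorF cr)).mpr ⟨cr, hcr, by simpa using hl, rfl⟩, ?_⟩
            rw [← hxf, xorF_cons]

-- GoodL buttons r s : some r-element combination of buttons has xor s (decidable)
def GoodL (buttons : List Int) (r : Nat) (s : Int) : Prop := s ∈ xorsOfSize buttons (r : Int)

theorem goodL_subperm {buttons : List Int} {r : Nat} {s : Int} :
    GoodL buttons r s ↔ ∃ c, c.Subperm buttons ∧ c.length = r ∧ xorF c = s := by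
  rw [GoodL, mem_xorsOfSize]
  constructor
  · rintro ⟨c, hs, hl, hx⟩; exact ⟨c, hs.subperm, hl, hx⟩
  · rintro ⟨c, hs, hl, hx⟩
    obtain ⟨c', hp, hsub⟩ := hs
    exact ⟨c', hsub, by rw [hp.length_eq, hl], by rw [xorF_perm hp, hx]⟩

theorem goodL_le {buttons : List Int} {r : Nat} {s : Int} (h : GoodL buttons r s) :
    r ≤ buttons.length := by
  obtain ⟨c, hs, hl, -⟩ := (mem_xorsOfSize buttons r s).mp h
  exact hl ▸ hs.length_le

-- hasD buttons s r : r is the minimum combination size reaching s ("BFS distance")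
def hasD (buttons : List Int) (s : Int) (r : Nat) : Prop :=
  GoodL buttons r s ∧ ∀ r' < r, ¬ GoodL buttons r' s

theorem hasD_unique {buttons : List Int} {s : Int} {r r' : Nat}
    (h : hasD buttons s r) (h' : hasD buttons s r') : r = r' := by
  rcases Nat.lt_trichotomy r r' with hlt | he | hgt
  · exact absurd h.1 (h'.2 r hlt)
  · exact he
  · exact absurd h'.1 (h.2 r' hgt)

theorem exists_hasD {buttons : List Int} {s : Int} {r : Nat} (h : GoodL buttons r s) :
    ∃ r' ≤ r, hasD buttons s r' := by
  haveI : DecidablePred (fun r => GoodL buttons r s) := fun r => by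
    unfold GoodL; infer_instance
  have hex : ∃ r, GoodL buttons r s := ⟨r, h⟩
  exact ⟨Nat.find hex, Nat.find_le h, Nat.find_spec hex, fun r' hlt => Nat.find_min hex hlt⟩

-- ---- neighbour step: from a reachable state, one button press reaches a state
-- whose combination is one larger or one smaller ----
theorem goodL_child {buttons : List Int} {r : Nat} {s : Int} (h : GoodL buttons r s)
    {b : Int} (hb : b ∈ buttons) :
    GoodL buttons (r + 1) (PySem.Int.bxor s b) ∨
      (1 ≤ r ∧ GoodL buttons (r - 1) (PySem.Int.bxor s b)) := by
  obtain ⟨c, hsub, hl, hx⟩ := goodL_subperm.mp h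
  by_cases hbc : b ∈ c
  · right
    have hperm : c.Perm (b :: c.erase b) := List.perm_cons_erase hbc
    have hxe : xorF c = PySem.Int.bxor b (xorF (c.erase b)) := by
      rw [xorF_perm hperm, xorF_cons]
    refine ⟨by cases c with | nil => simp at hbc | cons _ _ => simp [← hl], ?_⟩
    refine goodL_subperm.mpr ⟨c.erase b, (List.erase_sublist).subperm.trans hsub, ?_, ?_⟩
    · rw [List.length_erase_of_mem hbc, hl]
    · rw [PySem.Int.bxor_comm s b, ← hx, hxe, pvBxor_cancel]
  · left
    refine goodL_subperm.mpr ⟨b :: c, ?_, by simp [hl], by rw [xorF_cons, hx, PySem.Int.bxor_comm]⟩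
    rw [List.subperm_ext_iff]
    intro x hxm
    rcases List.mem_cons.mp hxm with rfl | hxc
    · have : List.count x c = 0 := List.count_eq_zero.mpr hbc
      simp [List.count_cons_self, this]
      exact hb
    · have hxb : x ≠ b := fun he => hbc (he ▸ hxc)
      have := (List.subperm_ext_iff.mp hsub) x hxc
      have hne : ¬ ((b == x) = true) := by simpa using Ne.symm hxb
      simp only [List.count_cons, if_neg hne]
      omega

-- from a combination of size r+1, peel one button to get a parent at size r
theorem goodL_parent {buttons : List Int} {r : Nat} {s : Int} (h : GoodL buttons (r + 1) s) :
    ∃ p b, b ∈ buttons ∧ GoodL buttons r p ∧ s = PySem.Int.bxor p b := by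
  obtain ⟨c, hsub, hl, hx⟩ := goodL_subperm.mp h
  cases c with
  | nil => simp at hl
  | cons b cr =>
    refine ⟨xorF cr, b, hsub.subset (List.mem_cons_self), ?_, ?_⟩
    · exact goodL_subperm.mpr ⟨cr, ((List.sublist_cons_self b cr).subperm).trans hsub, by simpa using hl, rfl⟩
    · rw [← hx, xorF_cons, PySem.Int.bxor_comm]

-- ---- the universe of reachable states and its size ----
def pvU (buttons : List Int) : List Int :=
  (List.range (buttons.length + 1)).flatMap (fun r : Nat => xorsOfSize buttons (r : Int))

theorem length_xorsOfSize (items : List Int) (r : Nat) :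
    (xorsOfSize items (r : Int)).length = items.length.choose r := by
  induction items generalizing r with
  | nil =>
    cases r with
    | zero => rw [xorsOfSize]; norm_num
    | succ r' =>
      rw [xorsOfSize]
      have h0 : ((r' + 1 : Nat) : Int) ≠ 0 := by push_cast; omega
      have h1 : (([] : List Int).length : Int) < ((r' + 1 : Nat) : Int) := by push_cast; simp
      rw [if_neg h0, if_pos h1]
      simp [Nat.choose_eq_zero_of_lt]
  | cons a items ih =>
    cases r with
    | zero => rw [xorsOfSize]; norm_num
    | succ r' =>
      rw [xorsOfSize]
      have h0 : ((r' + 1 : Nat) : Int) ≠ 0 := by push_cast; omega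
      by_cases hlen : (((a :: items).length : Int)) < ((r' + 1 : Nat) : Int)
      · rw [if_neg h0, if_pos hlen]
        have : (a :: items).length < r' + 1 := by
          simp only [List.length_cons] at hlen ⊢; push_cast at hlen; omega
        simp only [List.length_nil]
        exact (Nat.choose_eq_zero_of_lt (by simpa using this)).symm
      · rw [if_neg h0, if_neg hlen]
        have hsub : ((r' + 1 : Nat) : Int) - 1 = ((r' : Nat) : Int) := by push_cast; ring
        rw [hsub]
        simp only [List.length_append, List.length_map, ih r', ih (r' + 1), List.length_cons]
        rw [Nat.choose_succ_succ]

theorem pvListSumRange (f : Nat → Nat) (n : Nat) :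
    ((List.range n).map f).sum = ∑ i ∈ Finset.range n, f i := by
  induction n with
  | zero => simp
  | succ n ih => rw [List.range_succ, Finset.sum_range_succ, List.map_append, List.sum_append, ih]; simp

theorem card_pvU_le (buttons : List Int) :
    (pvU buttons).toFinset.card ≤ 2 ^ buttons.length := by
  refine le_trans (List.toFinset_card_le _) ?_
  rw [pvU, List.length_flatMap]
  have : (List.map (fun r => (xorsOfSize buttons ((r : Nat) : Int)).length) (List.range (buttons.length + 1))).sum
      = ∑ i ∈ Finset.range (buttons.length + 1), buttons.length.choose i := by
    rw [pvListSumRange (fun r => (xorsOfSize buttons ((r : Nat) : Int)).length) (buttons.length + 1)]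
    exact Finset.sum_congr rfl fun i _ => length_xorsOfSize buttons i
  rw [this, Nat.sum_range_choose]

theorem mem_pvU_of_goodL {buttons : List Int} {r : Nat} {s : Int} (h : GoodL buttons r s) :
    s ∈ pvU buttons := by
  rw [pvU, List.mem_flatMap]
  exact ⟨r, List.mem_range.mpr (by have := goodL_le h; omega), h⟩

-- ---- characterisation of B ----
theorem pvBLoop_of_hasD {target : Int} {buttons : List Int} {r : Nat}
    (h : hasD buttons target r) :
    ∀ a : Nat, a ≤ r →
      pvBLoop target buttons (PySem.List.pyRange (a : Int) ((buttons.length : Int) + 1) 1) = r := by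
  have hrn : r ≤ buttons.length := goodL_le h.1
  have main : ∀ d (a : Nat), a ≤ r → r - a = d →
      pvBLoop target buttons (PySem.List.pyRange (a : Int) ((buttons.length : Int) + 1) 1) = r := by
    intro d
    induction d with
    | zero =>
      intro a ha hd
      have : a = r := by omega
      subst this
      rw [PySem.List.pyRange_one_cons (by push_cast; omega)]
      rw [pvBLoop, if_pos (show target ∈ xorsOfSize buttons ((a : Nat) : Int) from h.1)]
    | succ d ih =>
      intro a ha hd
      have halt : a < r := by omega
      rw [PySem.List.pyRange_one_cons (by push_cast; omega)]
      rw [pvBLoop, if_neg (show ¬ target ∈ xorsOfSize buttons ((a : Nat) : Int) from h.2 a halt)]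
      have hc : ((a : Int) + 1) = ((a + 1 : Nat) : Int) := by push_cast; ring
      rw [hc]
      exact ih (a + 1) (by omega) (by omega)
  exact fun a ha => main (r - a) a ha rfl

theorem pvBLoop_of_none {target : Int} {buttons : List Int}
    (h : ∀ r : Nat, ¬ GoodL buttons r target) :
    ∀ a : Nat,
      pvBLoop target buttons (PySem.List.pyRange (a : Int) ((buttons.length : Int) + 1) 1) = -1 := by
  have main : ∀ d (a : Nat), buttons.length + 1 - a = d →
      pvBLoop target buttons (PySem.List.pyRange (a : Int) ((buttons.length : Int) + 1) 1) = -1 := by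
    intro d
    induction d with
    | zero =>
      intro a hd
      rw [PySem.List.pyRange_one_eq_nil (by push_cast; omega)]
      rfl
    | succ d ih =>
      intro a hd
      rw [PySem.List.pyRange_one_cons (by push_cast; omega)]
      rw [pvBLoop, if_neg (show ¬ target ∈ xorsOfSize buttons ((a : Nat) : Int) from h a)]
      have hc : ((a : Int) + 1) = ((a + 1 : Nat) : Int) := by push_cast; ring
      rw [hc]
      exact ih (a + 1) (by omega)
  exact fun a => main (buttons.length + 1 - a) a rfl

-- ---- BFS invariant ----
structure pvInv (target : Int) (buttons : List Int) (l : Nat)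
    (A B : List (Int × Int)) (visited : List Int) : Prop where
  hA : ∀ p ∈ A, p.2 = (l : Int) ∧ hasD buttons p.1 l
  hB : ∀ p ∈ B, p.2 = ((l : Int) + 1) ∧ hasD buttons p.1 (l + 1)
  hVlo : ∀ s r, r ≤ l → hasD buttons s r → s ∈ visited
  hVmem : ∀ s ∈ visited, (∃ r ≤ l, hasD buttons s r) ∨ s ∈ B.map Prod.fst
  hComp : ∀ s, hasD buttons s (l + 1) →
    s ∈ B.map Prod.fst ∨ ∃ p ∈ A.map Prod.fst, ∃ b ∈ buttons, s = PySem.Int.bxor p b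
  hTgt : target ∈ visited → target ∈ (A ++ B).map Prod.fst
  hQsub : ∀ s ∈ (A ++ B).map Prod.fst, s ∈ visited
  hQnd : ((A ++ B).map Prod.fst).Nodup
  hVnd : visited.Nodup

theorem pvInv_shift {target : Int} {buttons : List Int} {l : Nat}
    {B : List (Int × Int)} {visited : List Int}
    (h : pvInv target buttons l [] B visited) :
    pvInv target buttons (l + 1) B [] visited := by
  obtain ⟨hA, hB, hVlo, hVmem, hComp, hTgt, hQsub, hQnd, hVnd⟩ := h
  refine ⟨?_, ?_, ?_, ?_, ?_, ?_, ?_, ?_, hVnd⟩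
  · intro p hp
    have := hB p hp
    exact ⟨by rw [this.1]; push_cast; ring, this.2⟩
  · intro p hp; cases hp
  · intro s r hr hd
    rcases Nat.lt_or_ge r (l + 1) with hlt | hge
    · exact hVlo s r (by omega) hd
    · have : r = l + 1 := by omega
      subst this
      rcases hComp s hd with hmem | ⟨p, hp, -⟩
      · exact hQsub s (by simpa using hmem)
      · simp at hp
  · intro s hs
    rcases hVmem s hs with ⟨r, hr, hd⟩ | hmem
    · exact Or.inl ⟨r, by omega, hd⟩
    · rcases List.mem_map.mp hmem with ⟨p, hpB, rfl⟩
      exact Or.inl ⟨l + 1, le_refl _, (hB p hpB).2⟩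
  · intro s hd
    obtain ⟨p, b, hb, hGp, rfl⟩ := goodL_parent hd.1
    obtain ⟨r0, hr0le, hdp⟩ := exists_hasD hGp
    rcases Nat.lt_or_ge r0 (l + 1) with hlt | hge
    · exfalso
      rcases goodL_child hdp.1 hb with hch | ⟨hr1, hch⟩
      · exact hd.2 (r0 + 1) (by omega) hch
      · exact hd.2 (r0 - 1) (by omega) hch
    · have : r0 = l + 1 := by omega
      subst this
      rcases hComp p hdp with hpB | ⟨pp, hpp, -⟩
      · exact Or.inr ⟨p, hpB, b, hb, rfl⟩
      · simp at hpp
  · intro ht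
    have := hTgt ht
    simpa using this
  · intro s hs
    exact hQsub s (by simpa using hs)
  · simpa using hQnd

-- ---- the foldl over buttons explores the neighbours of one state ----
theorem pvFoldl_explore (bs : List Int) (currentLights presses : Int)
    (v : List Int) (q : List (Int × Int)) :
    ∃ news : List Int,
      bs.foldl (fun (vq : PySem.Set Int × List (Int × Int)) button =>
        let newLights := PySem.Int.bxor currentLights button
        if PySem.Set.contains vq.1 newLights then vq
        else (PySem.Set.add vq.1 newLights, vq.2 ++ [(newLights, presses + 1)])) (v, q) =
        (v ++ news, q ++ news.map (fun s => (s, presses + 1))) ∧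
      news.Nodup ∧
      (∀ s ∈ news, s ∉ v ∧ ∃ b ∈ bs, s = PySem.Int.bxor currentLights b) ∧
      (∀ b ∈ bs, PySem.Int.bxor currentLights b ∈ v ++ news) := by
  induction bs generalizing v q with
  | nil => exact ⟨[], by simp, by simp, by simp, by simp⟩
  | cons b bs ih =>
    rw [List.foldl_cons]
    by_cases hc : PySem.Int.bxor currentLights b ∈ v
    · have hcc : PySem.Set.contains v (PySem.Int.bxor currentLights b) = true :=
        (PySem.Set.contains_iff v _).mpr hc
      have hstep : (let newLights := PySem.Int.bxor currentLights b;
          if PySem.Set.contains (v, q).1 newLights = true then (v, q)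
          else (PySem.Set.add (v, q).1 newLights, (v, q).2 ++ [(newLights, presses + 1)]))
          = ((v : PySem.Set Int), q) := by
        simp [hcc, hc]
      rw [hstep]
      obtain ⟨news, heq, hnd, hprop, hall⟩ := ih v q
      refine ⟨news, heq, hnd, ?_, ?_⟩
      · intro s hs
        obtain ⟨h1, bb, hbb, h3⟩ := hprop s hs
        exact ⟨h1, bb, List.mem_cons_of_mem b hbb, h3⟩
      · intro bb hbb
        rcases List.mem_cons.mp hbb with rfl | hbb'
        · exact List.mem_append_left _ hc
        · exact hall bb hbb'
    · have hcc : PySem.Set.contains v (PySem.Int.bxor currentLights b) = false := by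
        rw [← Bool.not_eq_true]
        exact fun hx => hc ((PySem.Set.contains_iff v _).mp hx)
      have hadd : PySem.Set.add v (PySem.Int.bxor currentLights b) = v ++ [PySem.Int.bxor currentLights b] := by
        rw [PySem.Set.add, hcc]
        simp
      have hstep : (let newLights := PySem.Int.bxor currentLights b;
          if PySem.Set.contains (v, q).1 newLights = true then (v, q)
          else (PySem.Set.add (v, q).1 newLights, (v, q).2 ++ [(newLights, presses + 1)]))
          = ((v ++ [PySem.Int.bxor currentLights b] : PySem.Set Int), q ++ [(PySem.Int.bxor currentLights b, presses + 1)]) := by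
        simp [hcc, hadd, hc]
      rw [hstep]
      obtain ⟨news, heq, hnd, hprop, hall⟩ := ih (v ++ [PySem.Int.bxor currentLights b]) (q ++ [(PySem.Int.bxor currentLights b, presses + 1)])
      refine ⟨PySem.Int.bxor currentLights b :: news, ?_, ?_, ?_, ?_⟩
      · rw [heq]
        simp
      · refine List.nodup_cons.mpr ⟨?_, hnd⟩
        intro hmem
        exact ((hprop _ hmem).1) (List.mem_append_right v (List.mem_singleton.mpr rfl))
      · intro s hs
        rcases List.mem_cons.mp hs with rfl | hs'
        · exact ⟨hc, b, List.mem_cons_self, rfl⟩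
        · obtain ⟨h1, bb, hbb, h3⟩ := hprop s hs'
          refine ⟨fun hv => h1 (List.mem_append_left _ hv), bb, List.mem_cons_of_mem b hbb, h3⟩
      · intro bb hbb
        rcases List.mem_cons.mp hbb with rfl | hbb'
        · simp
        · have := hall bb hbb'
          simp only [List.mem_append] at this ⊢
          rcases this with (hv | hn) | hn'
          · exact Or.inl hv
          · exact Or.inr (List.mem_cons.mpr (Or.inl (List.mem_singleton.mp hn)))
          · exact Or.inr (List.mem_cons_of_mem _ hn')

theorem pvMapFst (c : Int) (news : List Int) :
    List.map (Prod.fst ∘ fun s : Int => (s, c)) news = news := by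
  induction news with
  | nil => rfl
  | cons a t iht => simpa using iht

-- if there is no state at combination-distance l+1, there is none above l at all
theorem pvNoLevels {buttons : List Int} {l : Nat}
    (h0 : ∀ s, ¬ hasD buttons s (l + 1)) :
    ∀ k (s : Int), l + 1 ≤ k → ¬ hasD buttons s k := by
  intro k
  induction k using Nat.strong_induction_on with
  | _ k ih =>
    intro s hk hd
    rcases Nat.eq_or_lt_of_le hk with he | hlt
    · exact h0 s (he ▸ hd)
    · cases k with
      | zero => omega
      | succ k' =>
        obtain ⟨p, b, hb, hGp, rfl⟩ := goodL_parent hd.1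
        obtain ⟨r0, hr0, hdp⟩ := exists_hasD hGp
        rcases Nat.lt_or_ge r0 (l + 1) with hlo | hhi
        · rcases goodL_child hdp.1 hb with hch | ⟨h1, hch⟩
          · exact hd.2 (r0 + 1) (by omega) hch
          · exact hd.2 (r0 - 1) (by omega) hch
        · exact ih r0 (by omega) p hhi hdp

-- ---- main loop lemma ----
theorem pvLoop_main (target : Int) (buttons : List Int) :
    ∀ fuel l (A B : List (Int × Int)) (visited : List Int),
      (A ≠ [] ∨ B = []) →
      pvInv target buttons l A B visited →
      2 * ((pvU buttons).toFinset.card - visited.length) + (A ++ B).length + 1 ≤ fuel →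
      pvBFSLoop target buttons fuel (A ++ B) visited =
        pvBLoop target buttons (PySem.List.pyRange 0 ((buttons.length : Int) + 1) 1) := by
  intro fuel
  induction fuel with
  | zero =>
    intro l A B visited hne hInv hfuel
    exact absurd hfuel (by omega)
  | succ fuel ih =>
    intro l A B visited hne hInv hfuel
    rcases A with _ | ⟨⟨cur, presses⟩, A'⟩
    · -- queue is empty: A = [], hence B = []
      have hB : B = [] := hne.resolve_left (fun h => h rfl)
      subst hB
      have hnone : ∀ r : Nat, ¬ GoodL buttons r target := by
        intro r hG
        obtain ⟨r0, hr0, hd0⟩ := exists_hasD hG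
        rcases Nat.lt_or_ge r0 (l + 1) with hlt | hgt
        · have hmem := hInv.hVlo target r0 (by omega) hd0
          have := hInv.hTgt hmem
          simpa using this
        · have h0 : ∀ s, ¬ hasD buttons s (l + 1) := by
            intro s hs
            rcases hInv.hComp s hs with hm | ⟨p, hp, -⟩
            · simpa using hm
            · simpa using hp
          exact pvNoLevels h0 r0 target (by omega) hd0
      have hbv := pvBLoop_of_none hnone 0
      rw [Nat.cast_zero] at hbv
      rw [hbv]
      rfl
    · -- dequeue (cur, presses)
      obtain ⟨hpr, hdc⟩ := hInv.hA (cur, presses) List.mem_cons_self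
      simp only at hpr
      subst hpr
      rw [List.cons_append, pvBFSLoop]
      by_cases htc : cur = target
      · rw [if_pos htc]
        subst htc
        have hbv := pvBLoop_of_hasD hdc 0 (Nat.zero_le l)
        rw [Nat.cast_zero] at hbv
        rw [hbv]
      · rw [if_neg htc]
        obtain ⟨news, heq, hnd, hprop, hall⟩ :=
          pvFoldl_explore buttons cur ((l : Nat) : Int) visited (A' ++ B)
        simp only [heq]
        have hnewD : ∀ s ∈ news, hasD buttons s (l + 1) := by
          intro s hs
          obtain ⟨hnv, b, hb, rfl⟩ := hprop s hs
          rcases goodL_child hdc.1 hb with hch | ⟨h1, hch⟩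
          · obtain ⟨r0, hr0, hd0⟩ := exists_hasD hch
            have hgt : ¬ r0 ≤ l := fun hle => hnv (hInv.hVlo _ r0 hle hd0)
            have : r0 = l + 1 := by omega
            exact this ▸ hd0
          · obtain ⟨r0, hr0, hd0⟩ := exists_hasD hch
            exact absurd (hInv.hVlo _ r0 (by omega) hd0) hnv
        have hInv' : pvInv target buttons l A' (B ++ news.map (fun s => (s, (l : Int) + 1)))
            (visited ++ news) := by
          obtain ⟨hA, hB, hVlo, hVmem, hComp, hTgt, hQsub, hQnd, hVnd⟩ := hInv
          refine ⟨?_, ?_, ?_, ?_, ?_, ?_, ?_, ?_, ?_⟩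
          · exact fun p hp => hA p (List.mem_cons_of_mem _ hp)
          · intro p hp
            rcases List.mem_append.mp hp with hp1 | hp2
            · exact hB p hp1
            · obtain ⟨sN, hsN, rfl⟩ := List.mem_map.mp hp2
              exact ⟨rfl, hnewD sN hsN⟩
          · exact fun s r hr hd => List.mem_append_left _ (hVlo s r hr hd)
          · intro s hs
            rcases List.mem_append.mp hs with hs1 | hs2
            · rcases hVmem s hs1 with hl1 | hl2
              · exact Or.inl hl1
              · exact Or.inr (by simp only [List.map_append]; exact List.mem_append_left _ hl2)
            · refine Or.inr ?_
              simp only [List.map_append, List.map_map]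
              refine List.mem_append_right _ ?_
              simpa using hs2
          · intro s hd
            rcases hComp s hd with hm | ⟨p, hpm, b, hb, rfl⟩
            · exact Or.inl (by simp only [List.map_append]; exact List.mem_append_left _ hm)
            · rw [List.map_cons] at hpm
              rcases List.mem_cons.mp hpm with rfl | hpA'
              · have hin := hall b hb
                rcases List.mem_append.mp hin with hv | hn
                · rcases hVmem _ hv with ⟨r, hrle, hdr⟩ | hl2
                  · exact absurd (hasD_unique hd hdr) (by omega)
                  · exact Or.inl (by simp only [List.map_append]; exact List.mem_append_left _ hl2)
                · refine Or.inl ?_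
                  simp only [List.map_append, List.map_map]
                  refine List.mem_append_right _ ?_
                  simpa using hn
              · exact Or.inr ⟨p, hpA', b, hb, rfl⟩
          · intro ht
            rcases List.mem_append.mp ht with hv | hn
            · have hTv := hTgt hv
              rw [List.cons_append, List.map_cons] at hTv
              rcases List.mem_cons.mp hTv with heqc | hq
              · exact absurd heqc.symm htc
              · simp only [List.map_append, List.mem_append] at hq ⊢
                rcases hq with h1 | h2
                · exact Or.inl h1
                · exact Or.inr (Or.inl h2)
            · simp only [List.map_append, List.map_map, List.mem_append]
              exact Or.inr (Or.inr (by simpa using hn))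
          · intro s hs
            simp only [List.map_append, List.map_map, List.mem_append] at hs
            rcases hs with h1 | h2 | h3
            · refine List.mem_append_left _ (hQsub s ?_)
              simp only [List.cons_append, List.map_cons, List.mem_cons, List.map_append,
                List.mem_append]
              exact Or.inr (Or.inl h1)
            · refine List.mem_append_left _ (hQsub s ?_)
              simp only [List.cons_append, List.map_cons, List.mem_cons, List.map_append,
                List.mem_append]
              exact Or.inr (Or.inr h2)
            · exact List.mem_append_right _ (by simpa using h3)
          · have hq0 : ((A' ++ B).map Prod.fst).Nodup := by
              have := hQnd
              simp only [List.cons_append, List.map_cons] at this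
              exact (List.nodup_cons.mp this).2
            have hre : (A' ++ (B ++ news.map (fun s => (s, (l : Int) + 1)))).map Prod.fst
                = (A' ++ B).map Prod.fst ++ news := by
              simp only [List.map_append, List.map_map, pvMapFst, List.append_assoc]
            rw [hre]
            refine List.Nodup.append hq0 hnd ?_
            intro x hx1 hx2
            exact (hprop x hx2).1 (hQsub x (by
              simp only [List.cons_append, List.map_cons]
              exact List.mem_cons_of_mem _ hx1))
          · refine List.Nodup.append hVnd hnd ?_
            intro x hx1 hx2
            exact (hprop x hx2).1 hx1
        have hsubU : ∀ x ∈ visited ++ news, x ∈ pvU buttons := by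
          intro x hx
          rcases List.mem_append.mp hx with hv | hn
          · rcases hInv.hVmem x hv with ⟨r, -, hdr⟩ | hl2
            · exact mem_pvU_of_goodL hdr.1
            · obtain ⟨p, hpB, rfl⟩ := List.mem_map.mp hl2
              exact mem_pvU_of_goodL ((hInv.hB p hpB).2).1
          · exact mem_pvU_of_goodL ((hnewD x hn).1)
        have hcard : (visited ++ news).length ≤ (pvU buttons).toFinset.card := by
          rw [← List.toFinset_card_of_nodup hInv'.hVnd]
          exact Finset.card_le_card (fun x hx => List.mem_toFinset.mpr
            (hsubU x (List.mem_toFinset.mp hx)))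
        have hbound : 2 * ((pvU buttons).toFinset.card - (visited ++ news).length) +
            (A' ++ (B ++ news.map (fun s => (s, (l : Int) + 1)))).length + 1 ≤ fuel := by
          simp only [List.length_append, List.length_map, List.length_cons] at hfuel hcard ⊢
          omega
        rw [List.append_assoc]
        by_cases hA' : A' = []
        · subst hA'
          have hshift := pvInv_shift hInv'
          have hres := ih (l + 1) (B ++ news.map (fun s => (s, (l : Int) + 1))) []
            (visited ++ news) (Or.inr rfl) hshift (by simpa using hbound)
          simpa using hres
        · exact ih l A' (B ++ news.map (fun s => (s, (l : Int) + 1)))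
            (visited ++ news) (Or.inl hA') hInv' hbound

-- ---- the state 0 is the unique state reachable with 0 presses ----
theorem hasD_zero (buttons : List Int) : hasD buttons 0 0 :=
  ⟨(mem_xorsOfSize buttons 0 0).mpr ⟨[], List.nil_sublist _, rfl, rfl⟩,
    fun r hr => absurd hr (Nat.not_lt_zero r)⟩

theorem goodL_zero_eq {buttons : List Int} {s : Int} (hG : GoodL buttons 0 s) : s = 0 := by
  obtain ⟨c, hsub, hlen, hx⟩ := (mem_xorsOfSize buttons 0 s).mp hG
  rw [List.length_eq_zero_iff.mp hlen] at hx
  exact hx.symm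

-- ---- main lemma for B's loop ----
theorem pvAltLoop_main (target : Int) (buttons : List Int) :
    ∀ fuel (r : Nat) (frontier seen : PySem.Set Int),
      (∀ s : Int, s ∈ frontier ↔ hasD buttons s r) →
      (∀ s : Int, s ∈ seen ↔ ∃ r' ≤ r, hasD buttons s r') →
      (∀ r' < r, ¬ hasD buttons target r') →
      seen.Nodup →
      ((frontier.isEmpty = true ∧ 1 ≤ fuel) ∨
        (pvU buttons).toFinset.card - seen.length + 2 ≤ fuel) →
      pvAltLoop target buttons fuel frontier seen (r : Int) =
        pvBLoop target buttons (PySem.List.pyRange 0 ((buttons.length : Int) + 1) 1) := by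
  intro fuel
  induction fuel with
  | zero =>
    intro r frontier seen hf1 hf2 hprev hnd hfuel
    rcases hfuel with ⟨-, h⟩ | h <;> omega
  | succ fuel ih =>
    intro r frontier seen hf1 hf2 hprev hnd hfuel
    rw [pvAltLoop]
    by_cases hemp : frontier.isEmpty = true
    · rw [if_pos hemp]
      have hfe : frontier = [] := List.isEmpty_iff.mp hemp
      subst hfe
      have hlev : ∀ s : Int, ¬ hasD buttons s r := by
        intro s hs
        exact absurd ((hf1 s).mpr hs) (List.not_mem_nil)
      cases r with
      | zero => exact absurd (hasD_zero buttons) (hlev 0)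
      | succ l =>
        have hnone : ∀ r' : Nat, ¬ GoodL buttons r' target := by
          intro r' hG
          obtain ⟨r0, hr0, hd0⟩ := exists_hasD hG
          rcases Nat.lt_or_ge r0 (l + 1) with hlt | hge
          · exact hprev r0 hlt hd0
          · exact pvNoLevels hlev r0 target hge hd0
        have hbv := pvBLoop_of_none hnone 0
        rw [Nat.cast_zero] at hbv
        rw [hbv]
    · rw [if_neg hemp]
      by_cases htf : PySem.Set.contains frontier target = true
      · rw [if_pos htf]
        have hdt : hasD buttons target r :=
          (hf1 target).mp ((PySem.Set.contains_iff frontier target).mp htf)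
        have hbv := pvBLoop_of_hasD hdt 0 (Nat.zero_le r)
        rw [Nat.cast_zero] at hbv
        rw [hbv]
      · rw [if_neg htf]
        have htgt : ¬ hasD buttons target r := fun hd =>
          htf ((PySem.Set.contains_iff frontier target).mpr ((hf1 target).mpr hd))
        have hNf : ∀ s : Int,
            s ∈ PySem.Set.diff (PySem.Set.ofList
              (frontier.flatMap (fun s => buttons.map (fun b => PySem.Int.bxor s b)))) seen ↔
            hasD buttons s (r + 1) := by
          intro s
          rw [PySem.Set.mem_diff, PySem.Set.mem_ofList, List.mem_flatMap]
          constructor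
          · rintro ⟨⟨p, hp, hmap⟩, hns⟩
            obtain ⟨b, hb, rfl⟩ := List.mem_map.mp hmap
            have hdp : hasD buttons p r := (hf1 p).mp hp
            have hnseen : ∀ r' ≤ r, ¬ hasD buttons (PySem.Int.bxor p b) r' := by
              intro r' hr' hd'
              exact hns ((hf2 _).mpr ⟨r', hr', hd'⟩)
            rcases goodL_child hdp.1 hb with hch | ⟨h1, hch⟩
            · obtain ⟨r0, hr0, hd0⟩ := exists_hasD hch
              have : r0 = r + 1 := by
                rcases Nat.lt_or_ge r0 (r + 1) with hlt | hge
                · exact absurd hd0 (hnseen r0 (by omega))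
                · omega
              exact this ▸ hd0
            · obtain ⟨r0, hr0, hd0⟩ := exists_hasD hch
              exact absurd hd0 (hnseen r0 (by omega))
          · intro hd
            obtain ⟨p, b, hb, hGp, rfl⟩ := goodL_parent hd.1
            obtain ⟨r0, hr0, hdp⟩ := exists_hasD hGp
            have hr0r : r0 = r := by
              rcases Nat.lt_or_ge r0 r with hlt | hge
              · exfalso
                rcases goodL_child hdp.1 hb with hch | ⟨h1, hch⟩
                · exact hd.2 (r0 + 1) (by omega) hch
                · exact hd.2 (r0 - 1) (by omega) hch
              · omega
            subst hr0r
            refine ⟨⟨p, (hf1 p).mpr hdp, List.mem_map.mpr ⟨b, hb, rfl⟩⟩, ?_⟩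
            intro hseen
            obtain ⟨r', hr', hd'⟩ := (hf2 _).mp hseen
            exact absurd (hasD_unique hd hd') (by omega)
        have hf2' : ∀ s : Int,
            s ∈ PySem.Set.union seen (PySem.Set.diff (PySem.Set.ofList
              (frontier.flatMap (fun s => buttons.map (fun b => PySem.Int.bxor s b)))) seen) ↔
            ∃ r' ≤ r + 1, hasD buttons s r' := by
          intro s
          rw [PySem.Set.mem_union]
          constructor
          · rintro (hs | hs)
            · obtain ⟨r', hr', hd'⟩ := (hf2 s).mp hs
              exact ⟨r', by omega, hd'⟩
            · exact ⟨r + 1, le_refl _, (hNf s).mp hs⟩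
          · rintro ⟨r', hr', hd'⟩
            rcases Nat.lt_or_ge r' (r + 1) with hlt | hge
            · exact Or.inl ((hf2 s).mpr ⟨r', by omega, hd'⟩)
            · have : r' = r + 1 := by omega
              subst this
              exact Or.inr ((hNf s).mpr hd')
        have hprev' : ∀ r' < r + 1, ¬ hasD buttons target r' := by
          intro r' hr'
          rcases Nat.lt_or_ge r' r with hlt | hge
          · exact hprev r' hlt
          · have : r' = r := by omega
            subst this
            exact htgt
        have hnd' : (PySem.Set.union seen (PySem.Set.diff (PySem.Set.ofList
            (frontier.flatMap (fun s => buttons.map (fun b => PySem.Int.bxor s b)))) seen)).Nodup :=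
          PySem.Set.nodup_union _ _ hnd
        have hcast : (r : Int) + 1 = ((r + 1 : Nat) : Int) := by push_cast; ring
        rw [hcast]
        refine ih (r + 1) _ _ hNf hf2' hprev' hnd' ?_
        -- fuel bookkeeping
        by_cases hnfe : (PySem.Set.diff (PySem.Set.ofList
            (frontier.flatMap (fun s => buttons.map (fun b => PySem.Int.bxor s b)))) seen).isEmpty = true
        · refine Or.inl ⟨hnfe, ?_⟩
          rcases hfuel with ⟨habs, -⟩ | h
          · exact absurd habs hemp
          · omega
        · refine Or.inr ?_
          rcases hfuel with ⟨habs, -⟩ | hfl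
          · exact absurd habs hemp
          have hsubU : ∀ x ∈ PySem.Set.union seen (PySem.Set.diff (PySem.Set.ofList
              (frontier.flatMap (fun s => buttons.map (fun b => PySem.Int.bxor s b)))) seen),
              x ∈ pvU buttons := by
            intro x hx
            rcases (PySem.Set.mem_union _ _ x).mp hx with hs | hs
            · obtain ⟨r', -, hd'⟩ := (hf2 x).mp hs
              exact mem_pvU_of_goodL hd'.1
            · exact mem_pvU_of_goodL ((hNf x).mp hs).1
          have hcard : (PySem.Set.union seen (PySem.Set.diff (PySem.Set.ofList
              (frontier.flatMap (fun s => buttons.map (fun b => PySem.Int.bxor s b)))) seen)).length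
              ≤ (pvU buttons).toFinset.card := by
            rw [← List.toFinset_card_of_nodup hnd']
            exact Finset.card_le_card (fun x hx => List.mem_toFinset.mpr
              (hsubU x (List.mem_toFinset.mp hx)))
          have hgrow : seen.length + 1 ≤ (PySem.Set.union seen (PySem.Set.diff (PySem.Set.ofList
              (frontier.flatMap (fun s => buttons.map (fun b => PySem.Int.bxor s b)))) seen)).length := by
            have hne : (PySem.Set.diff (PySem.Set.ofList
                (frontier.flatMap (fun s => buttons.map (fun b => PySem.Int.bxor s b)))) seen) ≠ [] :=
              fun he => hnfe (by rw [he]; rfl)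
            obtain ⟨x, hxnf⟩ := List.exists_mem_of_ne_nil _ hne
            have hxseen : x ∉ seen := ((PySem.Set.mem_diff _ _ x).mp hxnf).2
            have hsub : seen.toFinset ⊆ (PySem.Set.union seen (PySem.Set.diff (PySem.Set.ofList
                (frontier.flatMap (fun s => buttons.map (fun b => PySem.Int.bxor s b)))) seen)).toFinset := by
              intro y hy
              exact List.mem_toFinset.mpr ((PySem.Set.mem_union _ _ y).mpr
                (Or.inl (List.mem_toFinset.mp hy)))
            have hxin : x ∈ (PySem.Set.union seen (PySem.Set.diff (PySem.Set.ofList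
                (frontier.flatMap (fun s => buttons.map (fun b => PySem.Int.bxor s b)))) seen)).toFinset :=
              List.mem_toFinset.mpr ((PySem.Set.mem_union _ _ x).mpr (Or.inr hxnf))
            have hcard2 : seen.toFinset.card + 1 ≤ (PySem.Set.union seen (PySem.Set.diff (PySem.Set.ofList
                (frontier.flatMap (fun s => buttons.map (fun b => PySem.Int.bxor s b)))) seen)).toFinset.card := by
              have := Finset.card_le_card (Finset.insert_subset hxin hsub)
              rw [Finset.card_insert_of_notMem (fun hxm => hxseen (List.mem_toFinset.mp hxm))] at this
              omega
            rw [List.toFinset_card_of_nodup hnd, List.toFinset_card_of_nodup hnd'] at hcard2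
            exact hcard2
          omega

-- ===== VERDICT (by name: the statement is the Claim_ definition above) =====
theorem pseudoBFS_spec : Claim_equal_pseudoBFS := by
  intro target buttons num_lights _
  show pseudoBFS target buttons num_lights = pseudoBFS_alt target buttons num_lights
  have hzero : ∀ s : Int, GoodL buttons 0 s → s = 0 := fun s => goodL_zero_eq
  -- A's loop computes the least combination size (pvLoop_main)
  have hInv : pvInv target buttons 0 [((0 : Int), (0 : Int))] [] [0] := by
    refine ⟨?_, ?_, ?_, ?_, ?_, ?_, ?_, ?_, ?_⟩
    · intro p hp
      rw [List.mem_singleton.mp hp]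
      exact ⟨by simp, hasD_zero buttons⟩
    · intro p hp; cases hp
    · intro s r hr hd
      have hr0 : r = 0 := by omega
      subst hr0
      rw [hzero s hd.1]
      exact List.mem_singleton.mpr rfl
    · intro s hs
      rw [List.mem_singleton.mp hs]
      exact Or.inl ⟨0, le_refl _, hasD_zero buttons⟩
    · intro s hd
      obtain ⟨p, b, hb, hGp, rfl⟩ := goodL_parent hd.1
      rw [hzero p hGp]
      exact Or.inr ⟨0, by simp, b, hb, rfl⟩
    · intro ht
      simpa using List.mem_singleton.mp ht
    · intro s hs
      simpa using hs
    · simp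
    · simp
  have hfuelA : 2 * ((pvU buttons).toFinset.card - ([(0 : Int)] : List Int).length) +
      ([((0 : Int), (0 : Int))] ++ ([] : List (Int × Int))).length + 1 ≤
      2 ^ (buttons.length + 1) + 2 := by
    have hc := card_pvU_le buttons
    have hp : 2 ^ (buttons.length + 1) = 2 * 2 ^ buttons.length := by
      rw [pow_succ]; ring
    simp only [List.length_singleton, List.length_append, List.length_nil]
    omega
  have hres := pvLoop_main target buttons (2 ^ (buttons.length + 1) + 2) 0
    [((0 : Int), (0 : Int))] [] [0] (Or.inl (by simp)) hInv hfuelA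
  -- B's loop computes the least combination size (pvAltLoop_main)
  have hf1 : ∀ s : Int, s ∈ PySem.Set.ofList [(0 : Int)] ↔ hasD buttons s 0 := by
    intro s
    rw [PySem.Set.mem_ofList]
    constructor
    · intro hs
      rw [List.mem_singleton.mp hs]
      exact hasD_zero buttons
    · intro hd
      rw [hzero s hd.1]
      exact List.mem_singleton.mpr rfl
  have hf2 : ∀ s : Int, s ∈ PySem.Set.ofList [(0 : Int)] ↔ ∃ r' ≤ 0, hasD buttons s r' := by
    intro s
    rw [PySem.Set.mem_ofList]
    constructor
    · intro hs
      rw [List.mem_singleton.mp hs]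
      exact ⟨0, le_refl _, hasD_zero buttons⟩
    · rintro ⟨r', hr', hd⟩
      have : r' = 0 := by omega
      subst this
      rw [hzero s hd.1]
      exact List.mem_singleton.mpr rfl
  have hlen1 : (PySem.Set.ofList [(0 : Int)]).length = 1 := rfl
  have hfuelB : ((PySem.Set.ofList [(0 : Int)]).isEmpty = true ∧ 1 ≤ 2 ^ buttons.length + 2) ∨
      (pvU buttons).toFinset.card - (PySem.Set.ofList [(0 : Int)]).length + 2 ≤
        2 ^ buttons.length + 2 := by
    right
    have hc := card_pvU_le buttons
    omega
  have halt := pvAltLoop_main target buttons (2 ^ buttons.length + 2) 0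
    (PySem.Set.ofList [0]) (PySem.Set.ofList [0]) hf1 hf2
    (fun r hr => absurd hr (Nat.not_lt_zero r)) (PySem.Set.nodup_ofList _) hfuelB
  rw [Nat.cast_zero] at halt
  rw [pseudoBFS, pseudoBFS_alt, halt]
  have hof : (PySem.Set.ofList [(0 : Int)]) = ([0] : List Int) := rfl
  rw [hof]
  simpa using hres
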